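-- pv_equiv track=rewrite | github.com/SanjinDedic/agent_games | single_file_game.py | assign_points
-- ===== SOURCE A (Python) =====
-- def assign_points(game_result, max_score=6):
--     banked_money = game_result['banked_money']
--
--     sorted_scores = sorted(banked_money.items(), key=lambda x: x[1], reverse=True)
--     points_distribution = {}
--     last_score = None
--     last_rank = 0
--
--     for rank, (player, score) in enumerate(sorted_scores, start=1):
--         if score != last_score:  # New score, update rank
--             last_rank = rank
--         last_score = score
--
--         # Assign points based on rank
--         points = max(max_score - last_rank, 0)
--         points_distribution[player] = points
--
--     return points_distribution
-- ===== SOURCE B (Python) =====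
-- def assign_points(game_result, max_score=6):
--     banked_money = game_result['banked_money']
--     scores = list(banked_money.values())
--     points_distribution = {}
--     for player, score in sorted(banked_money.items(), key=lambda x: x[1], reverse=True):
--         rank = 1 + sum(1 for other in scores if other > score)
--         points_distribution[player] = max(max_score - rank, 0)
--     return points_distribution
-- ===== Notes on version B (the rewrite author's own statement) =====
-- stated objective: alternative
-- what changed: Replaces A's stateful tie-tracking sweep (last_score/last_rank carried across the loop) by computing each player's competition rank directly as 1 + the count of strictly greater scores; Pre_ excludes inputs whose banked_money association list carries duplicate player keys, where the list-to-dict correspondence is ambiguous, and inputs missing the 'banked_money' key, where A raises KeyError.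
import Mathlib
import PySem

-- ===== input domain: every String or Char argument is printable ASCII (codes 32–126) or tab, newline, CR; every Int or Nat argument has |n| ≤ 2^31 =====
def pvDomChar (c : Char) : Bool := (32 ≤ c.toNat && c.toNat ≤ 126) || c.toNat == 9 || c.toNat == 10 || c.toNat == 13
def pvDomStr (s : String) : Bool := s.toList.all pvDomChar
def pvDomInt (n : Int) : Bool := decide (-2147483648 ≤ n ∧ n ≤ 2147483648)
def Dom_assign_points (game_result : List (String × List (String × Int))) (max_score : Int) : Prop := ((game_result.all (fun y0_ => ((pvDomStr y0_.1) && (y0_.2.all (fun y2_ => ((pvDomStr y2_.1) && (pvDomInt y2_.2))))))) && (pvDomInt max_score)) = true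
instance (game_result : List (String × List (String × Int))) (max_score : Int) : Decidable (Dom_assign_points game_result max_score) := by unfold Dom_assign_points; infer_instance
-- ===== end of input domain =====

-- B replaces A's stateful tie-tracking sweep by computing each player's competition rank
-- directly as 1 + the count of strictly greater scores (alternative decomposition, same results).


-- ===== PORT A =====
-- one iteration of A's loop body: state = (last_score, last_rank, points_distribution)
def stepA (max_score : Int) (st : Option Int × Int × PySem.Dict String Int)
    (rp : Int × (String × Int)) : Option Int × Int × PySem.Dict String Int :=
  let last_rank := if some rp.2.2 ≠ st.1 then rp.1 else st.2.1
  let points := max (max_score - last_rank) 0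
  (some rp.2.2, last_rank, st.2.2.insert rp.2.1 points)

def assign_points (game_result : List (String × List (String × Int))) (max_score : Int) : List (String × Int) :=
  match (PySem.Dict.mk game_result).get? "banked_money" with
  | none => []  -- KeyError in Python; excluded by Pre_
  | some banked_money =>
    let sorted_scores := PySem.List.sorted banked_money (fun x => x.2) true
    let st := (PySem.List.enumerate sorted_scores 1).foldl (stepA max_score)
      (none, 0, PySem.Dict.empty)
    st.2.2.items

-- ===== PORT B =====
def assign_points_alt (game_result : List (String × List (String × Int))) (max_score : Int) : List (String × Int) :=
  match (PySem.Dict.mk game_result).get? "banked_money" with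
  | none => []  -- KeyError in Python; excluded by Pre_
  | some banked_money =>
    let scores := banked_money.map Prod.snd
    ((PySem.List.sorted banked_money (fun x => x.2) true).foldl
      (fun (d : PySem.Dict String Int) p =>
        let rank : Int := 1 + ((scores.map (fun other => if other > p.2 then (1 : Int) else 0)).sum)
        d.insert p.1 (max (max_score - rank) 0))
      PySem.Dict.empty).items

-- ===== PRECONDITION & SPEC =====
-- Pre_ requires the 'banked_money' key (A raises KeyError without it) and excludes banked_money
-- association lists with duplicate player keys, on which the list-to-Python-dict correspondence is ambiguous.
def Pre_assign_points (game_result : List (String × List (String × Int))) (max_score : Int) : Prop :=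
  "banked_money" ∈ game_result.map Prod.fst ∧
  ∀ p ∈ game_result, p.1 = "banked_money" → (p.2.map Prod.fst).Nodup
instance (game_result : List (String × List (String × Int))) (max_score : Int) : Decidable (Pre_assign_points game_result max_score) := by unfold Pre_assign_points; infer_instance

def pvWitness_assign_points : (List (String × List (String × Int))) × Int :=
  ([("banked_money", [("a", 3), ("b", 1), ("c", 3)])], 6)

def Spec_assign_points (game_result : List (String × List (String × Int))) (max_score : Int) (out : List (String × Int)) : Prop := out = assign_points_alt game_result max_score
instance (game_result : List (String × List (String × Int))) (max_score : Int) (out : List (String × Int)) : Decidable (Spec_assign_points game_result max_score out) := by unfold Spec_assign_points; infer_instance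

-- ===== CLAIM (what is proved, stated in full; the proofs are below) =====
def Claim_equal_assign_points : Prop := ∀ (game_result : List (String × List (String × Int))) (max_score : Int), Dom_assign_points game_result max_score → Pre_assign_points game_result max_score → Spec_assign_points game_result max_score (assign_points game_result max_score)

-- ===== LEMMAS AND PROOFS =====

-- A's sweep over the (desc-sorted) tail ss, having already processed pref, produces the same dict
-- as inserting max(max_score - (1 + #strictly-greater-in-full), 0) for every pair of ss.
theorem foldA_eq (max_score : Int) (full : List Int) :
    ∀ (ss pref : List (String × Int)) (lr : Int) (d : PySem.Dict String Int),
    full = (pref ++ ss).map Prod.snd →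
    (((pref ++ ss).map Prod.snd).Pairwise (fun a b => b ≤ a)) →
    ∀ (last : Option Int),
    (last = none → pref = []) →
    (∀ s, last = some s → (∀ p ∈ pref, s ≤ p.2) ∧ (∀ q ∈ ss, q.2 ≤ s) ∧
        lr = 1 + (full.countP (fun x => decide (s < x)) : Int)) →
    ((PySem.List.enumerate ss ((pref.length : Int) + 1)).foldl (stepA max_score) (last, lr, d)).2.2
      = ss.foldl (fun d p =>
          d.insert p.1 (max (max_score - (1 + (full.countP (fun x => decide (p.2 < x)) : Int))) 0)) d := by
  intro ss
  induction ss with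
  | nil => intro pref lr d _ _ last _ _; simp [PySem.List.enumerate]
  | cons x rest ih =>
    intro pref lr d hfull hsorted last hnone hsome
    rw [List.map_append] at hsorted
    obtain ⟨hP1, hP2, hcross⟩ := List.pairwise_append.mp hsorted
    have hhead : ∀ b ∈ rest.map Prod.snd, b ≤ x.2 :=
      (List.pairwise_cons.mp (by rw [List.map_cons] at hP2; exact hP2)).1
    rw [PySem.List.enumerate_cons, List.foldl_cons, List.foldl_cons]
    -- the new last_rank equals 1 + #{strictly greater than x.2 in full}
    have hcnt : (if some x.2 ≠ last then (pref.length : Int) + 1 else lr)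
        = 1 + (full.countP (fun y => decide (x.2 < y)) : Int) := by
      by_cases hne : some x.2 ≠ last
      · -- new score: every pref score is strictly greater
        rw [if_pos hne]
        have hx_le : ∀ p ∈ pref, x.2 ≤ p.2 := fun p hp =>
          hcross p.2 (List.mem_map_of_mem hp) x.2 (by simp)
        have hstrict : ∀ p ∈ pref, x.2 < p.2 := by
          intro p hp
          rcases lt_or_eq_of_le (hx_le p hp) with h | h
          · exact h
          · exfalso
            cases hlast : last with
            | none => exact absurd hp (by simp [hnone hlast])
            | some s =>
              obtain ⟨hmin, hup, -⟩ := hsome s hlast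
              have h1 : s ≤ x.2 := h ▸ hmin p hp
              have h2 : x.2 ≤ s := hup x (by simp)
              exact hne (by rw [hlast, le_antisymm h2 h1])
        have hrest : ((x.2 :: rest.map Prod.snd).countP (fun y => decide (x.2 < y))) = 0 := by
          rw [List.countP_eq_zero]
          intro a ha
          rcases List.mem_cons.mp ha with rfl | ha
          · simp
          · simpa using not_lt.mpr (hhead a ha)
        have hpref : ((pref.map Prod.snd).countP (fun y => decide (x.2 < y)))
            = (pref.map Prod.snd).length := by
          rw [List.countP_eq_length]
          intro a ha
          rcases List.mem_map.mp ha with ⟨p, hp, rfl⟩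
          simpa using hstrict p hp
        rw [hfull, List.map_append, List.countP_append, List.map_cons, hrest, hpref]
        simp; ring
      · rw [if_neg hne]
        exact (hsome x.2 (not_ne_iff.mp hne).symm).2.2
    -- step and recurse with pref' = pref ++ [x]
    have hrec := ih (pref ++ [x]) (1 + (full.countP (fun y => decide (x.2 < y)) : Int))
      (d.insert x.1 (max (max_score - (1 + (full.countP (fun y => decide (x.2 < y)) : Int))) 0))
      (by simpa using hfull) (by rw [show (pref ++ [x]) ++ rest = pref ++ x :: rest by simp, List.map_append]; exact hsorted) (some x.2)
      (by intro h; cases h) ?_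
    · simp only [stepA, hcnt]
      rw [show ((pref.length : Int) + 1 + 1) = (((pref ++ [x]).length : Int) + 1) by simp]
      exact hrec
    · intro s hs
      cases hs
      refine ⟨?_, ?_, rfl⟩
      · intro p hp
        rcases List.mem_append.mp hp with hp | hp
        · exact hcross p.2 (List.mem_map_of_mem hp) x.2 (by simp)
        · simp at hp; simp [hp]
      · intro q hq
        exact hhead q.2 (List.mem_map_of_mem hq)

-- B's per-player rank-by-counting computation coincides with A's sweep on the sorted list.
theorem assign_points_spec : Claim_equal_assign_points := by
  unfold Claim_equal_assign_points
  intro gr ms _ hpre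
  unfold Spec_assign_points assign_points assign_points_alt
  obtain ⟨hmem, hnd⟩ := hpre
  cases h : (PySem.Dict.mk gr).get? "banked_money" with
  | none =>
    exfalso
    exact ((PySem.Dict.get?_eq_none_iff_not_mem_keys (PySem.Dict.mk gr) "banked_money").mp h)
      (by simpa [PySem.Dict.keys] using hmem)
  | some bm =>
    have hbm : ("banked_money", bm) ∈ gr := PySem.Dict.mem_items_of_get?_eq_some _ h
    have hbmnd : (bm.map Prod.fst).Nodup := hnd _ hbm rfl
    -- the sorted list and its score multiset
    have hpw : ((PySem.List.sorted bm (fun x => x.2) true).map Prod.snd).Pairwise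
        (fun a b => b ≤ a) := by
      rw [List.pairwise_map]
      exact PySem.List.sorted_pairwise_rev bm (fun x => x.2)
    have hperm : ((PySem.List.sorted bm (fun x => x.2) true).map Prod.snd).Perm
        (bm.map Prod.snd) := (PySem.List.sorted_perm bm (fun x => x.2) true).map Prod.snd
    have hA := foldA_eq ms ((PySem.List.sorted bm (fun x => x.2) true).map Prod.snd)
      (PySem.List.sorted bm (fun x => x.2) true) [] 0 PySem.Dict.empty rfl
      (by simpa using hpw) none (fun _ => rfl) (fun s hs => by cases hs)
    simp only [List.length_nil, Int.natCast_zero, zero_add] at hA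
    show (List.foldl (stepA ms) (none, 0, PySem.Dict.empty)
        (PySem.List.enumerate (PySem.List.sorted bm (fun x => x.2) true) 1)).2.2.items = _
    rw [hA]
    -- B's summed 0/1 indicator is the same strictly-greater count
    have hfun : ∀ (d : PySem.Dict String Int) (p : String × Int),
        d.insert p.1 (max (ms - (1 + ((bm.map Prod.snd).map
            (fun other => if other > p.2 then (1 : Int) else 0)).sum)) 0)
        = d.insert p.1 (max (ms - (1 +
            (((PySem.List.sorted bm (fun x => x.2) true).map Prod.snd).countP
              (fun x => decide (p.2 < x)) : Int))) 0) := by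
      intro d p
      rw [hperm.countP_eq]
      rw [show ((bm.map Prod.snd).map (fun other => if other > p.2 then (1 : Int) else 0)).sum
          = (((bm.map Prod.snd).countP (fun x => decide (p.2 < x)) : Nat) : Int) by
        rw [← PySem.List.sum_map_ite_one_zero (fun x => decide (p.2 < x)) (bm.map Prod.snd)]
        simp [gt_iff_lt]]
    simp only [hfun]
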